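-- pv_equiv track=rewrite | github.com/sec-bit/mle-pcs | src/mle.py | mle_eval_from_evals
-- ===== SOURCE A (Python) =====
-- def mle_eval_from_evals(evals, point):
--     k = len(point)
--     f = evals[:]
--     half = len(f) >> 1
--     for z in point:
--         even = f[::2]
--         odd = f[1::2]
--         f = [even[i] + z * (odd[i] - even[i]) for i in range(half)]
--         half >>= 1
--     return f[0]
-- ===== SOURCE B (Python) =====
-- def mle_eval_from_evals(evals, point):
--     total = 0
--     for i in range(1 << len(point)):
--         w = 1
--         bits = i
--         for z in point:
--             w *= z if bits % 2 == 1 else 1 - z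
--             bits //= 2
--         total += evals[i] * w
--     return total
-- ===== Notes on version B (the rewrite author's own statement) =====
-- stated objective: alternative
-- what changed: Replaces A's k successive halving passes over the evaluation table (even/odd slices recombined per coordinate) with a single direct weighted sum: for each of the 2^k table entries the eq-weight is read off the bits of its index and accumulated into one scalar.
import Mathlib
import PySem

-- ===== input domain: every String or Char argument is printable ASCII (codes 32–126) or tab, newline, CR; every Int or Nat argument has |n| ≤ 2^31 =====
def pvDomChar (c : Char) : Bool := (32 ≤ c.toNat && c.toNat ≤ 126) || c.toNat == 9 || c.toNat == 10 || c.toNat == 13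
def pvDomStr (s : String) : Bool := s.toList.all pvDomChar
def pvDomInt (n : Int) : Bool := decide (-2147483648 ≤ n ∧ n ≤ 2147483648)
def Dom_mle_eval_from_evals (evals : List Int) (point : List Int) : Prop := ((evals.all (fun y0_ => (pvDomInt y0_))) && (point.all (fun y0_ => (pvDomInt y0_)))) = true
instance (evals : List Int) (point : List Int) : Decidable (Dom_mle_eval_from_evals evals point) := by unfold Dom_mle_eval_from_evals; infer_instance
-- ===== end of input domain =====

-- B replaces A's k rounds of pairwise array folding by a single direct weighted sum over
-- the 2^k table entries (alternative decomposition, same exact result).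

-- ===== PORT A =====
-- literal port of A: f = evals[:], half = len(f) >> 1; per coordinate z take even = f[::2],
-- odd = f[1::2] and rebuild f over range(half); finally f[0] (pyGetD with default 0 is
-- exact under Pre_, which guarantees every access is in range).
def mle_eval_from_evals (evals : List Int) (point : List Int) : Int :=
  let f := evals
  let half := f.length >>> 1
  let st := point.foldl (fun (st : List Int × Nat) z =>
      let even := (PySem.List.slice? st.1 none none 2).getD []
      let odd  := (PySem.List.slice? st.1 (some 1) none 2).getD []
      ((PySem.List.pyRange 0 (st.2 : Int) 1).map (fun i =>
          PySem.List.pyGetD even i 0 + z * (PySem.List.pyGetD odd i 0 - PySem.List.pyGetD even i 0)),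
       st.2 >>> 1))
    (f, half)
  PySem.List.pyGetD st.1 0 0

-- ===== PORT B =====
-- literal port of Source B: total = 0; for i in range(2 ** len(point)): build w from the bits
-- of i (bits % 2, bits //= 2 — PySem.Int.mod / floordiv are Python's floor semantics),
-- then total += evals[i] * w.
def mle_eval_from_evals_alt (evals : List Int) (point : List Int) : Int :=
  (PySem.List.pyRange 0 ((2 : Int) ^ point.length) 1).foldl (fun total i =>
      total + PySem.List.pyGetD evals i 0 *
        (point.foldl (fun (st : Int × Int) z =>
            (st.1 * (if PySem.Int.mod st.2 2 == 1 then z else 1 - z),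
             PySem.Int.floordiv st.2 2)) (1, i)).1)
    0

-- ===== PRECONDITION & SPEC =====
-- Pre_ excludes exactly the inputs where Python A raises IndexError (fewer than
-- 2^len(point) evaluations, so the final f[0] — after k halvings — is out of range);
-- Python B raises IndexError on exactly the same inputs (evals[i], i < 2^len(point)).
def Pre_mle_eval_from_evals (evals : List Int) (point : List Int) : Prop :=
  2 ^ point.length ≤ evals.length
instance (evals : List Int) (point : List Int) : Decidable (Pre_mle_eval_from_evals evals point) := by
  unfold Pre_mle_eval_from_evals; infer_instance

def pvWitness_mle_eval_from_evals : List Int × List Int := ([3, 1, 4, 1], [2, 5])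

def Spec_mle_eval_from_evals (evals : List Int) (point : List Int) (out : Int) : Prop := out = mle_eval_from_evals_alt evals point
instance (evals : List Int) (point : List Int) (out : Int) : Decidable (Spec_mle_eval_from_evals evals point out) := by unfold Spec_mle_eval_from_evals; infer_instance

-- ===== CLAIM (what is proved, stated in full; the proofs are below) =====
def Claim_equal_mle_eval_from_evals : Prop := ∀ (evals : List Int) (point : List Int), Dom_mle_eval_from_evals evals point → Pre_mle_eval_from_evals evals point → Spec_mle_eval_from_evals evals point (mle_eval_from_evals evals point)

-- ===== LEMMAS AND PROOFS =====

-- the eq-weight of index `bits` at `point` (point[0] is the least-significant bit)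
def pvWgt (bits : Int) : List Int → Int
  | [] => 1
  | z :: rest =>
      (if PySem.Int.mod bits 2 == 1 then z else 1 - z) * pvWgt (PySem.Int.floordiv bits 2) rest

-- one folding round of A, in closed form
def pvStep (z : Int) (f : List Int) : List Int :=
  (List.range (f.length / 2)).map (fun i =>
    f.getD (2 * i) 0 + z * (f.getD (2 * i + 1) 0 - f.getD (2 * i) 0))

theorem pv_filterMap_range (f : List Int) (g : Nat → Nat) (m : Nat)
    (h : ∀ j < m, g j < f.length) :
    (List.range m).filterMap (fun j => f[g j]?) = (List.range m).map (fun j => f.getD (g j) 0) := by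
  induction m with
  | zero => simp
  | succ m ih =>
      rw [List.range_succ, List.filterMap_append, List.map_append,
        ih (fun j hj => h j (Nat.lt_succ_of_lt hj))]
      have hm : g m < f.length := h m (Nat.lt_succ_self m)
      simp [List.getElem?_eq_getElem hm, List.getD_eq_getElem?_getD]

theorem pv_even_eq (f : List Int) :
    (PySem.List.slice? f none none 2).getD [] =
      (List.range ((f.length + 1) / 2)).map (fun j => f.getD (2 * j) 0) := by
  simp only [PySem.List.slice?, PySem.List.sliceIndices]
  norm_num
  have hc : (if 0 < f.length then (((f.length : Int) + 2 - 1) / 2).toNat else 0) = (f.length + 1) / 2 := by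
    split_ifs <;> omega
  rw [hc]
  have hx : ∀ x : Nat, ((2 * (x : Int))).toNat = 2 * x := fun x => by omega
  simp only [hx]
  rw [pv_filterMap_range f (fun j => 2 * j) _ (by intro j hj; show 2 * j < f.length; omega)]
  simp [List.getD_eq_getElem?_getD]

theorem pv_odd_eq (f : List Int) :
    (PySem.List.slice? f (some 1) none 2).getD [] =
      (List.range (f.length / 2)).map (fun j => f.getD (2 * j + 1) 0) := by
  simp only [PySem.List.slice?, PySem.List.sliceIndices]
  norm_num
  by_cases h0 : f.length = 0
  · simp [h0]
  · have hmin : min (1 : Int) (f.length : Int) = 1 := by omega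
    simp only [hmin]
    have hc : (if 1 < f.length then (((f.length : Int) - 1 + 2 - 1) / 2).toNat else 0) = f.length / 2 := by
      split_ifs <;> omega
    rw [hc]
    have hx : ∀ x : Nat, ((1 + 2 * (x : Int))).toNat = 2 * x + 1 := fun x => by omega
    simp only [hx]
    rw [pv_filterMap_range f (fun j => 2 * j + 1) _ (by intro j hj; show 2 * j + 1 < f.length; omega)]
    simp [List.getD_eq_getElem?_getD]

-- A's loop body over range(half) with half = len f / 2 is pvStep
theorem pv_body_eq (z : Int) (f : List Int) :
    (PySem.List.pyRange 0 ((f.length / 2 : Nat) : Int) 1).map (fun i =>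
        PySem.List.pyGetD ((PySem.List.slice? f none none 2).getD []) i 0 +
          z * (PySem.List.pyGetD ((PySem.List.slice? f (some 1) none 2).getD []) i 0 -
            PySem.List.pyGetD ((PySem.List.slice? f none none 2).getD []) i 0)) = pvStep z f := by
  rw [PySem.List.pyRange_one, List.map_map]
  have hn : (((f.length / 2 : Nat) : Int) - 0).toNat = f.length / 2 := by omega
  rw [hn, pvStep]
  apply List.map_congr_left
  intro k hk
  rw [List.mem_range] at hk
  simp only [Function.comp, zero_add, PySem.List.pyGetD_natCast, pv_even_eq, pv_odd_eq]
  rw [PySem.List.getD_map_range _ _ _ _ (by omega : k < (f.length + 1) / 2),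
      PySem.List.getD_map_range _ _ _ _ hk]

-- A's whole loop, with the redundant `half` tracked by the invariant half = len f >> 1
theorem pv_foldA (point : List Int) : ∀ f : List Int,
    point.foldl (fun (st : List Int × Nat) z =>
        let even := (PySem.List.slice? st.1 none none 2).getD []
        let odd  := (PySem.List.slice? st.1 (some 1) none 2).getD []
        ((PySem.List.pyRange 0 (st.2 : Int) 1).map (fun i =>
            PySem.List.pyGetD even i 0 + z * (PySem.List.pyGetD odd i 0 - PySem.List.pyGetD even i 0)),
         st.2 >>> 1)) (f, f.length >>> 1)
      = (point.foldl (fun f z => pvStep z f) f,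
         (point.foldl (fun f z => pvStep z f) f).length >>> 1) := by
  induction point with
  | nil => intro f; simp
  | cons z rest ih =>
      intro f
      simp only [List.foldl_cons]
      have hsh : f.length >>> 1 = f.length / 2 := Nat.shiftRight_one _
      have hstep : (pvStep z f).length = f.length / 2 := by
        simp [pvStep]
      have hbody :
          ((PySem.List.pyRange 0 ((f.length >>> 1 : Nat) : Int) 1).map (fun i =>
            PySem.List.pyGetD ((PySem.List.slice? f none none 2).getD []) i 0 +
              z * (PySem.List.pyGetD ((PySem.List.slice? f (some 1) none 2).getD []) i 0 -
                PySem.List.pyGetD ((PySem.List.slice? f none none 2).getD []) i 0)) ,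
           (f.length >>> 1) >>> 1)
          = (pvStep z f, (pvStep z f).length >>> 1) := by
        rw [hsh, pv_body_eq]
        simp [hstep, Nat.shiftRight_one]
      rw [hbody]
      exact ih (pvStep z f)

theorem pv_wfold (point : List Int) : ∀ w bits : Int,
    (point.foldl (fun (st : Int × Int) z =>
        (st.1 * (if PySem.Int.mod st.2 2 == 1 then z else 1 - z),
         PySem.Int.floordiv st.2 2)) (w, bits)).1 = w * pvWgt bits point := by
  induction point with
  | nil => intro w bits; simp [pvWgt]
  | cons z rest ih =>
      intro w bits
      simp only [List.foldl_cons, pvWgt]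
      rw [ih, mul_assoc]

theorem pv_sum_double (n : Nat) (h : Nat → Int) :
    ((List.range (2 * n)).map h).sum
      = ((List.range n).map (fun i => h (2 * i) + h (2 * i + 1))).sum := by
  induction n with
  | zero => simp
  | succ n ih =>
      have h2 : 2 * (n + 1) = (2 * n + 1) + 1 := by omega
      rw [h2, List.range_succ, List.range_succ, List.range_succ]
      simp only [List.map_append, List.sum_append, List.map_cons, List.map_nil,
        List.sum_cons, List.sum_nil, add_zero]
      rw [ih]; ring

theorem pv_wgt_even (i : Nat) (z : Int) (rest : List Int) :
    pvWgt ((2 * i : Nat) : Int) (z :: rest) = (1 - z) * pvWgt (i : Int) rest := by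
  have h1 : PySem.Int.mod ((2 * i : Nat) : Int) 2 = 0 := by
    rw [PySem.Int.mod_eq_emod_of_pos (by omega : (0:Int) < 2)]; omega
  have h2 : PySem.Int.floordiv ((2 * i : Nat) : Int) 2 = (i : Int) := by
    rw [PySem.Int.floordiv_eq_ediv_of_pos (by omega : (0:Int) < 2)]; omega
  simp only [pvWgt]
  rw [h1, h2]
  norm_num

theorem pv_wgt_odd (i : Nat) (z : Int) (rest : List Int) :
    pvWgt ((2 * i + 1 : Nat) : Int) (z :: rest) = z * pvWgt (i : Int) rest := by
  have h1 : PySem.Int.mod ((2 * i + 1 : Nat) : Int) 2 = 1 := by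
    rw [PySem.Int.mod_eq_emod_of_pos (by omega : (0:Int) < 2)]; omega
  have h2 : PySem.Int.floordiv ((2 * i + 1 : Nat) : Int) 2 = (i : Int) := by
    rw [PySem.Int.floordiv_eq_ediv_of_pos (by omega : (0:Int) < 2)]; omega
  simp only [pvWgt]
  rw [h1, h2]
  norm_num

-- the folded table's head is the weighted sum, given enough evaluations
theorem pv_main (point : List Int) : ∀ f : List Int, 2 ^ point.length ≤ f.length →
    (point.foldl (fun f z => pvStep z f) f).getD 0 0
      = ((List.range (2 ^ point.length)).map (fun i => f.getD i 0 * pvWgt (i : Int) point)).sum := by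
  induction point with
  | nil => intro f hf; simp [pvWgt]
  | cons z rest ih =>
      intro f hf
      have h2 : 2 ^ (z :: rest).length = 2 * 2 ^ rest.length := by
        rw [List.length_cons, pow_succ]; ring
      have hlen : 2 ^ rest.length ≤ (pvStep z f).length := by
        simp only [pvStep, List.length_map, List.length_range]
        omega
      rw [List.foldl_cons, ih (pvStep z f) hlen, h2, pv_sum_double]
      apply congrArg List.sum
      apply List.map_congr_left
      intro i hi
      rw [List.mem_range] at hi
      have hstep : (pvStep z f).getD i 0
          = f.getD (2 * i) 0 + z * (f.getD (2 * i + 1) 0 - f.getD (2 * i) 0) := by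
        have hi2 : i < f.length / 2 := by omega
        exact PySem.List.getD_map_range _ _ _ _ hi2
      rw [hstep, pv_wgt_even, pv_wgt_odd]
      ring

theorem pv_A_eq (evals point : List Int) :
    mle_eval_from_evals evals point = (point.foldl (fun f z => pvStep z f) evals).getD 0 0 := by
  simp only [mle_eval_from_evals]
  rw [pv_foldA point evals]
  exact PySem.List.pyGetD_zero _ _

theorem pv_B_eq (evals point : List Int) :
    mle_eval_from_evals_alt evals point
      = ((List.range (2 ^ point.length)).map (fun i => evals.getD i 0 * pvWgt (i : Int) point)).sum := by
  simp only [mle_eval_from_evals_alt]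
  rw [PySem.List.foldl_add, PySem.List.pyRange_one, List.map_map]
  have hn : (((2 : Int) ^ point.length) - 0).toNat = 2 ^ point.length := by
    have h1 : ((2 : Int) ^ point.length) = ((2 ^ point.length : Nat) : Int) := by push_cast; ring
    rw [sub_zero, h1, Int.toNat_natCast]
  rw [hn, zero_add]
  apply congrArg List.sum
  apply List.map_congr_left
  intro j _
  simp only [Function.comp, zero_add, PySem.List.pyGetD_natCast, pv_wfold, one_mul]

-- ===== VERDICT (by name: the statement is the Claim_ definition above) =====
theorem mle_eval_from_evals_spec : Claim_equal_mle_eval_from_evals := by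
  intro evals point _ hpre
  unfold Spec_mle_eval_from_evals
  rw [pv_A_eq, pv_B_eq, pv_main point evals hpre]
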